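-- pv_equiv track=rewrite | github.com/round-down/Game-Projects | Python Projects/txtAdvGame/functions.py | __para_fix
-- ===== SOURCE A (Python) =====
-- def __para_fix(str, width):#will output the total value of words and spaces that can fit within the screen size
--     str += ' '
--     sum = 0
--     distance = 0
--     for i in str:
--         if i == ' ':
--             if sum + distance >= width:
--                 break
--             else:
--                 sum += distance + 1
--                 distance = 0
--         else:
--             distance += 1
--     return sum
-- ===== SOURCE B (Python) =====
-- def __para_fix(str, width):
--     total = 0
--     for word in str.split(' '):
--         if total + len(word) >= width:
--             break
--         total += len(word) + 1
--     return total
-- ===== Notes on version B (the rewrite author's own statement) =====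
-- stated objective: faster
-- what changed: Replaces the char-by-char scan with a sentinel space and a running distance counter by a single split(' ') followed by a flat loop over whole words.
import Mathlib
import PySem

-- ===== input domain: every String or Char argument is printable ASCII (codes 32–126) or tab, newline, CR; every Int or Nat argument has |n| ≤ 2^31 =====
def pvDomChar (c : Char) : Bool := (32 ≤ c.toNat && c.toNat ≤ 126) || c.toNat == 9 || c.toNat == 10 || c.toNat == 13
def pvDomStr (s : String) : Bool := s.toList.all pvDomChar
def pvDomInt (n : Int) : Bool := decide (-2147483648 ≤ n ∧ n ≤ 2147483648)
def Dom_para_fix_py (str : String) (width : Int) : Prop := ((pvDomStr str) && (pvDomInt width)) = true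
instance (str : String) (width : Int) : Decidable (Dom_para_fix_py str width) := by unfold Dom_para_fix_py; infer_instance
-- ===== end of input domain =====

-- B replaces A's char-by-char scan (sentinel space + distance accumulator) by split(' ') and a flat loop over words (objective: simpler).

-- ===== PORT A =====
-- the for-loop with `break`: structural recursion over the chars, state (sum, distance)
def paraFixLoopA (width : Int) : List Char → Int → Int → Int
  | [], sum, _ => sum
  | c :: rest, sum, dist =>
    if c = ' ' then
      if sum + dist ≥ width then sum
      else paraFixLoopA width rest (sum + dist + 1) 0
    else paraFixLoopA width rest sum (dist + 1)

def para_fix_py (str : String) (width : Int) : Int :=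
  paraFixLoopA width (str.toList ++ [' ']) 0 0   -- str += ' '

-- ===== PORT B =====
-- the for-loop with `break` over str.split(' '): structural recursion over the word list
def paraFixLoopB (width : Int) : List (List Char) → Int → Int
  | [], total => total
  | w :: ws, total =>
    if total + (w.length : Int) ≥ width then total
    else paraFixLoopB width ws (total + (w.length : Int) + 1)

def para_fix_py_alt (str : String) (width : Int) : Int :=
  paraFixLoopB width (PySem.Chars.splitOn str.toList [' ']) 0

-- ===== PRECONDITION & SPEC =====
def Spec_para_fix_py (str : String) (width : Int) (out : Int) : Prop := out = para_fix_py_alt str width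
instance (str : String) (width : Int) (out : Int) : Decidable (Spec_para_fix_py str width out) := by unfold Spec_para_fix_py; infer_instance

-- ===== CLAIM (what is proved, stated in full; the proofs are below) =====
def Claim_equal_para_fix_py : Prop := ∀ (str : String) (width : Int), Dom_para_fix_py str width → Spec_para_fix_py str width (para_fix_py str width)

-- ===== LEMMAS AND PROOFS =====

-- a simple structural characterisation of splitting on a single space
def spaceSplit : List Char → List (List Char)
  | [] => [[]]
  | c :: rest =>
    if c = ' ' then [] :: spaceSplit rest
    else
      match spaceSplit rest with
      | [] => [[c]]
      | w :: ws => (c :: w) :: ws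

theorem spaceSplit_ne_nil (cs : List Char) : spaceSplit cs ≠ [] := by
  cases cs with
  | nil => simp [spaceSplit]
  | cons c rest =>
    simp only [spaceSplit]
    split
    · simp
    · split <;> simp

-- fuel-based go of PySem.Chars.splitOn on sep = [' '] computes spaceSplit
theorem splitOn_go_space (l : List Char) : ∀ (fuel : Nat) (cur : List Char) (acc : List (List Char)),
    l.length < fuel →
    PySem.Chars.splitOn.go [' '] fuel l cur acc =
      acc.reverse ++ (match spaceSplit l with
        | [] => [cur.reverse]
        | w :: ws => (cur.reverse ++ w) :: ws) := by
  induction l with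
  | nil =>
    intro fuel cur acc h
    cases fuel with
    | zero => omega
    | succ f => simp [PySem.Chars.splitOn.go, spaceSplit]
  | cons c rest ih =>
    intro fuel cur acc h
    cases fuel with
    | zero => simp at h
    | succ f =>
      by_cases hc : c = ' '
      · subst hc
        have hpre : List.isPrefixOf [' '] (' ' :: rest) = true := by
          simp [List.isPrefixOf]
        rw [PySem.Chars.splitOn.go]
        simp only [hpre, if_true, List.length_cons, List.length_nil, List.drop_succ_cons,
          List.drop_zero]
        rw [ih f [] (cur.reverse :: acc) (by simpa using Nat.lt_of_succ_lt_succ h)]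
        simp only [spaceSplit, if_true]
        cases hs : spaceSplit rest with
        | nil => exact absurd hs (spaceSplit_ne_nil rest)
        | cons w ws => simp
      · have hpre : List.isPrefixOf [' '] (c :: rest) = false := by
          simp [List.isPrefixOf]
          exact fun h' => hc h'.symm
        rw [PySem.Chars.splitOn.go]
        simp only [hpre, Bool.false_eq_true, if_false]
        rw [ih f (c :: cur) acc (by simpa using Nat.lt_of_succ_lt_succ h)]
        simp only [spaceSplit, hc, if_false]
        cases hs : spaceSplit rest with
        | nil => exact absurd hs (spaceSplit_ne_nil rest)
        | cons w ws => simp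

theorem splitOn_space (cs : List Char) :
    PySem.Chars.splitOn cs [' '] = spaceSplit cs := by
  rw [PySem.Chars.splitOn]
  rw [splitOn_go_space cs (cs.length + 1) [] [] (by omega)]
  cases hs : spaceSplit cs with
  | nil => exact absurd hs (spaceSplit_ne_nil cs)
  | cons w ws => simp

-- core: A's char loop over cs ++ [' '] equals B's word loop over spaceSplit cs,
-- where the pending distance d is a prefix of the first word
theorem loopA_eq_loopB (width : Int) (cs : List Char) :
    ∀ (sum : Int) (d : Nat),
    paraFixLoopA width (cs ++ [' ']) sum (d : Int) =
      (match spaceSplit cs with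
        | [] => sum
        | w :: ws =>
          if sum + ((d : Int) + (w.length : Int)) ≥ width then sum
          else paraFixLoopB width ws (sum + ((d : Int) + (w.length : Int)) + 1)) := by
  induction cs with
  | nil =>
    intro sum d
    simp only [List.nil_append, paraFixLoopA, spaceSplit, List.length_nil, Nat.cast_zero,
      add_zero, if_true]
    split_ifs with h
    · rfl
    · simp [paraFixLoopB]
  | cons c rest ih =>
    intro sum d
    by_cases hc : c = ' '
    · subst hc
      simp only [List.cons_append, paraFixLoopA, spaceSplit, if_true,
        List.length_nil, Nat.cast_zero, add_zero]
      split_ifs with h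
      · rfl
      · have := ih (sum + (d : Int) + 1) 0
        simp only [Nat.cast_zero, zero_add] at this
        rw [this]
        cases hs : spaceSplit rest with
        | nil => exact absurd hs (spaceSplit_ne_nil rest)
        | cons w ws => simp [paraFixLoopB]
    · simp only [List.cons_append, paraFixLoopA, hc, if_false]
      have := ih sum (d + 1)
      push_cast at this
      rw [this]
      simp only [spaceSplit, hc, if_false]
      cases hs : spaceSplit rest with
      | nil => exact absurd hs (spaceSplit_ne_nil rest)
      | cons w ws =>
        simp only [List.length_cons]
        split_ifs with h1 h2 h2
        · rfl
        · exact absurd (by push_cast at h1 ⊢; omega) h2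
        · exact absurd (by push_cast at h2 ⊢; omega) h1
        · congr 1; push_cast; ring

-- ===== VERDICT (by name: the statement is the Claim_ definition above) =====
theorem para_fix_py_spec : Claim_equal_para_fix_py := by
  intro str width _
  unfold Spec_para_fix_py para_fix_py para_fix_py_alt
  rw [splitOn_space]
  have := loopA_eq_loopB width str.toList 0 0
  simp only [Nat.cast_zero, zero_add] at this
  rw [this]
  cases hs : spaceSplit str.toList with
  | nil => exact absurd hs (spaceSplit_ne_nil str.toList)
  | cons w ws => simp [paraFixLoopB]
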